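-- pv_equiv track=rewrite | github.com/docxology/MetaInformAnt | src/metainformant/spatial/integration/scrna_mapping.py | _intersect_genes
-- ===== SOURCE A (Python) =====
-- def _intersect_genes(
--     spatial_genes: list[str],
--     ref_genes: list[str],
-- ) -> tuple[list[int], list[int], list[str]]:
--     """Find shared genes between spatial and reference datasets.
--
--     Returns:
--         Tuple of (spatial_indices, ref_indices, shared_gene_names).
--     """
--     spatial_set = {g: i for i, g in enumerate(spatial_genes)}
--     ref_set = {g: i for i, g in enumerate(ref_genes)}
--
--     shared = sorted(set(spatial_genes) & set(ref_genes))
--     spatial_idx = [spatial_set[g] for g in shared]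
--     ref_idx = [ref_set[g] for g in shared]
--
--     return spatial_idx, ref_idx, shared
-- ===== SOURCE B (Python) =====
-- def _last_per_gene(genes: list[str]) -> list[tuple[int, str]]:
--     """One (index, gene) pair per distinct gene, keeping the largest
--     (= last) index, sorted by gene: stable sort, then a run scan."""
--     pairs = sorted(enumerate(genes), key=lambda p: p[1])
--     out: list[tuple[int, str]] = []
--     for i, g in pairs:
--         if out and out[-1][1] == g:
--             if i > out[-1][0]:
--                 out[-1] = (i, g)
--         else:
--             out.append((i, g))
--     return out
--
--
-- def _intersect_genes(
--     spatial_genes: list[str],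
--     ref_genes: list[str],
-- ) -> tuple[list[int], list[int], list[str]]:
--     """Find shared genes between spatial and reference datasets.
--
--     Sort-merge join: reduce each list to gene-sorted (last_index, gene)
--     pairs, then advance two pointers over the sorted runs, emitting the
--     three output columns directly in sorted-gene order (no dicts/sets).
--     """
--     sp = _last_per_gene(spatial_genes)
--     rf = _last_per_gene(ref_genes)
--     spatial_idx: list[int] = []
--     ref_idx: list[int] = []
--     shared: list[str] = []
--     a = b = 0
--     while a < len(sp) and b < len(rf):
--         ia, ga = sp[a]
--         ib, gb = rf[b]
--         if ga == gb:
--             spatial_idx.append(ia)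
--             ref_idx.append(ib)
--             shared.append(ga)
--             a += 1
--             b += 1
--         elif ga < gb:
--             a += 1
--         else:
--             b += 1
--     return spatial_idx, ref_idx, shared
-- ===== Notes on version B (the rewrite author's own statement) =====
-- stated objective: alternative
-- what changed: Replaces the hash-based set-intersection-plus-dict-lookup with a sort-merge join: each list is reduced by a stable sort and run scan to gene-sorted (last_index, gene) pairs, and a two-pointer merge emits all three output columns at once; no dicts or sets are used.
import Mathlib
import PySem

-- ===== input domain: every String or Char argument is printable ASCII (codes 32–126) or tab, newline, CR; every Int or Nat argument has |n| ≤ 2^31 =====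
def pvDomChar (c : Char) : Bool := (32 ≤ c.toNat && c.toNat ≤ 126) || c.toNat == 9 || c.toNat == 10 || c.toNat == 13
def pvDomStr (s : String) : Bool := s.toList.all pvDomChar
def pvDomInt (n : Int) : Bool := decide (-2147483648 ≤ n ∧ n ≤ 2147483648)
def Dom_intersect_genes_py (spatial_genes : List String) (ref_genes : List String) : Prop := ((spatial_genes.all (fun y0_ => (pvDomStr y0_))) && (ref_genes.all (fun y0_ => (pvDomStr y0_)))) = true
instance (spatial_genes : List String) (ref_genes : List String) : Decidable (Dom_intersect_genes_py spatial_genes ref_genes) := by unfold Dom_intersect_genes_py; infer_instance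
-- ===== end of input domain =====

-- B replaces A's hash-based set intersection + dict lookups by a sort-merge join:
-- gene-sorted (last_index, gene) runs merged with two pointers (alternative; return value only).


-- ===== PORT A =====
-- {g: i for i, g in enumerate(genes)} — the comprehension A builds twice
def pvIdxDict (genes : List String) : PySem.Dict String Int :=
  (PySem.List.enumerate genes 0).foldl (fun d p => d.insert p.2 p.1) PySem.Dict.empty

def intersect_genes_py (spatial_genes : List String) (ref_genes : List String) :
    List Int × List Int × List String :=
  let spatial_set := pvIdxDict spatial_genes
  let ref_set := pvIdxDict ref_genes
  let shared := PySem.List.sorted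
    (PySem.Set.inter (PySem.Set.ofList spatial_genes) (PySem.Set.ofList ref_genes))
    (fun g => g) false
  -- spatial_set[g] / ref_set[g]: KeyError is impossible (g ∈ shared ⊆ both key sets),
  -- so getD's default is unreachable and the port is exact
  let spatial_idx := shared.map (fun g => spatial_set.getD g 0)
  let ref_idx := shared.map (fun g => ref_set.getD g 0)
  (spatial_idx, ref_idx, shared)

-- ===== PORT B =====
-- the run scan of _last_per_gene, written head-forward: merging two adjacent
-- equal-gene pairs keeps the larger index, exactly the loop's out[-1] update
def pvLastScan : List (Int × String) → List (Int × String)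
  | [] => []
  | [p] => [p]
  | p :: q :: t =>
      if p.2 == q.2 then pvLastScan ((max p.1 q.1, p.2) :: t)
      else p :: pvLastScan (q :: t)
termination_by l => l.length

-- _last_per_gene: stable sort of enumerate(genes) by gene, then the run scan
def pvLastPerGene (genes : List String) : List (Int × String) :=
  pvLastScan (PySem.List.sorted (PySem.List.enumerate genes 0) (fun p => p.2) false)

-- the two-pointer while loop, emitting the three output columns
def pvMergeShared : List (Int × String) → List (Int × String) →
    List Int × List Int × List String
  | [], _ => ([], [], [])
  | _ :: _, [] => ([], [], [])
  | a :: as, b :: bs =>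
      if a.2 == b.2 then
        let r := pvMergeShared as bs
        (a.1 :: r.1, b.1 :: r.2.1, a.2 :: r.2.2)
      else if a.2 < b.2 then
        pvMergeShared as (b :: bs)
      else
        pvMergeShared (a :: as) bs
termination_by xs ys => xs.length + ys.length

def intersect_genes_py_alt (spatial_genes : List String) (ref_genes : List String) :
    List Int × List Int × List String :=
  pvMergeShared (pvLastPerGene spatial_genes) (pvLastPerGene ref_genes)

-- ===== PRECONDITION & SPEC =====
def Spec_intersect_genes_py (spatial_genes : List String) (ref_genes : List String) (out : List Int × List Int × List String) : Prop := out = intersect_genes_py_alt spatial_genes ref_genes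
instance (spatial_genes : List String) (ref_genes : List String) (out : List Int × List Int × List String) : Decidable (Spec_intersect_genes_py spatial_genes ref_genes out) := by unfold Spec_intersect_genes_py; infer_instance

-- ===== CLAIM (what is proved, stated in full; the proofs are below) =====
def Claim_equal_intersect_genes_py : Prop := ∀ (spatial_genes : List String) (ref_genes : List String), Dom_intersect_genes_py spatial_genes ref_genes → Spec_intersect_genes_py spatial_genes ref_genes (intersect_genes_py spatial_genes ref_genes)

-- ===== LEMMAS AND PROOFS =====

-- the maximum index recorded for gene g in a pair list (none = gene absent)
def pvOptMax (L : List (Int × String)) (g : String) : Option Int :=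
  ((L.filter (fun p => p.2 == g)).map Prod.fst).max?

-- the join of two pair lists, as a filterMap (proof-side description of the merge)
def pvJoinF (xs ys : List (Int × String)) : List (Int × Int × String) :=
  xs.filterMap (fun a => (ys.find? (fun b => b.2 == a.2)).map (fun b => (a.1, b.1, a.2)))

theorem pv_max?_perm (l l' : List Int) (h : l.Perm l') : l.max? = l'.max? := by
  cases hm : l'.max? with
  | none => rw [List.max?_eq_none_iff] at hm ⊢; subst hm; exact h.eq_nil
  | some m =>
      rw [List.max?_eq_some_iff] at hm ⊢
      exact ⟨h.mem_iff.mpr hm.1, fun b hb => hm.2 b (h.mem_iff.mp hb)⟩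

theorem pvOptMax_perm (L L' : List (Int × String)) (g : String) (h : L.Perm L') :
    pvOptMax L g = pvOptMax L' g :=
  pv_max?_perm _ _ (((h.filter _).map Prod.fst))

theorem pv_fold_insert_get? (l : List (Int × String)) (d : PySem.Dict String Int) (g : String)
    (h : l.Pairwise (fun p q => p.1 < q.1)) :
    (l.foldl (fun d p => d.insert p.2 p.1) d).get? g = (pvOptMax l g).or (d.get? g) := by
  induction l generalizing d with
  | nil => simp [pvOptMax]
  | cons p t ih =>
      rw [List.pairwise_cons] at h
      rw [List.foldl_cons, ih _ h.2]
      by_cases hg : g = p.2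
      · subst hg
        rw [PySem.Dict.get?_insert_self]
        have hf : (p :: t).filter (fun q => q.2 == p.2) = p :: t.filter (fun q => q.2 == p.2) := by
          simp
        unfold pvOptMax
        rw [hf, List.map_cons]
        cases hM : ((t.filter (fun q => q.2 == p.2)).map Prod.fst).max? with
        | none =>
            rw [List.max?_eq_none_iff] at hM
            simp [hM]
        | some m =>
            rw [List.max?_eq_some_iff] at hM
            have hpm : p.1 ≤ m := by
              obtain ⟨q, hq, hq1⟩ := List.mem_map.mp hM.1
              exact le_of_lt (hq1 ▸ h.1 q (List.mem_of_mem_filter hq))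
            have : (p.1 :: (t.filter (fun q => q.2 == p.2)).map Prod.fst).max? = some m := by
              rw [List.max?_eq_some_iff]
              refine ⟨List.mem_cons_of_mem _ hM.1, ?_⟩
              intro b hb
              rcases List.mem_cons.mp hb with hb | hb
              · exact hb ▸ hpm
              · exact hM.2 b hb
            simp [this]
      · rw [PySem.Dict.get?_insert_of_ne _ _ hg]
        have hf : (p :: t).filter (fun q => q.2 == g) = t.filter (fun q => q.2 == g) := by
          simp [Ne.symm hg]
        simp [pvOptMax, hf]

theorem pvIdxDict_get? (genes : List String) (g : String) :
    (pvIdxDict genes).get? g = pvOptMax (PySem.List.enumerate genes 0) g := by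
  unfold pvIdxDict
  rw [pv_fold_insert_get? _ _ _ (PySem.List.pairwise_lt_enumerate _ _)]
  simp [PySem.Dict.get?_empty]

theorem mem_map_snd_pvLastScan (L : List (Int × String)) (g : String) :
    g ∈ (pvLastScan L).map Prod.snd ↔ g ∈ L.map Prod.snd := by
  induction L using pvLastScan.induct with
  | case1 => simp [pvLastScan]
  | case2 p => simp [pvLastScan]
  | case3 p q t heq ih =>
      rw [pvLastScan, if_pos heq, ih]
      have : p.2 = q.2 := by simpa using heq
      simp [this]
  | case4 p q t hne ih =>
      rw [pvLastScan, if_neg hne]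
      simp at ih ⊢
      tauto

theorem pairwise_pvLastScan (L : List (Int × String))
    (h : L.Pairwise (fun p q => p.2 ≤ q.2)) :
    (pvLastScan L).Pairwise (fun p q => p.2 < q.2) := by
  induction L using pvLastScan.induct with
  | case1 => simp [pvLastScan]
  | case2 p => simp [pvLastScan]
  | case3 p q t heq ih =>
      rw [pvLastScan, if_pos heq]
      apply ih
      rw [List.pairwise_cons] at h ⊢
      refine ⟨fun r hr => ?_, (h.2).tail⟩
      exact h.1 r (List.mem_cons_of_mem q hr)
  | case4 p q t hne ih =>
      rw [pvLastScan, if_neg hne]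
      rw [List.pairwise_cons] at h
      rw [List.pairwise_cons]
      refine ⟨fun r hr => ?_, ih h.2⟩
      have hr2 : r.2 ∈ (q :: t).map Prod.snd :=
        (mem_map_snd_pvLastScan _ _).mp (List.mem_map_of_mem hr)
      have hpq : p.2 < q.2 := lt_of_le_of_ne (h.1 q (List.mem_cons_self)) (by simpa using hne)
      rcases List.mem_map.mp hr2 with ⟨s, hs, hseq⟩
      rcases List.mem_cons.mp hs with hsq | hst
      · subst hsq; exact hseq ▸ hpq
      · have : q.2 ≤ s.2 := (List.pairwise_cons.mp h.2).1 s hst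
        exact hseq ▸ lt_of_lt_of_le hpq this

theorem pv_max?_merge (a b : Int) (l : List Int) :
    (a :: b :: l).max? = (max a b :: l).max? := by
  cases h : l.max? <;> simp [List.max?_cons, h, max_assoc]

theorem pvOptMax_squash (p q : Int × String) (t : List (Int × String)) (g : String)
    (hpq : p.2 = q.2) :
    pvOptMax (p :: q :: t) g = pvOptMax ((max p.1 q.1, p.2) :: t) g := by
  unfold pvOptMax
  by_cases hg : p.2 = g
  · have h1 : (p :: q :: t).filter (fun r => r.2 == g)
        = p :: q :: t.filter (fun r => r.2 == g) := by
      simp [hg, hpq ▸ hg]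
    have h2 : (((max p.1 q.1, p.2) : Int × String) :: t).filter (fun r => r.2 == g)
        = (max p.1 q.1, p.2) :: t.filter (fun r => r.2 == g) := by
      simp [hg]
    rw [h1, h2, List.map_cons, List.map_cons, List.map_cons, pv_max?_merge]
  · simp [hg, hpq ▸ hg]

theorem val_pvLastScan (L : List (Int × String))
    (h : L.Pairwise (fun p q => p.2 ≤ q.2)) (x : Int × String) (hx : x ∈ pvLastScan L) :
    pvOptMax L x.2 = some x.1 := by
  induction L using pvLastScan.induct with
  | case1 => simp [pvLastScan] at hx
  | case2 p =>
      simp [pvLastScan] at hx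
      subst hx
      simp [pvOptMax]
  | case3 p q t heq ih =>
      rw [pvLastScan, if_pos heq] at hx
      have hpq : p.2 = q.2 := by simpa using heq
      rw [pvOptMax_squash p q t x.2 hpq]
      rw [List.pairwise_cons] at h
      have hq := List.pairwise_cons.mp h.2
      exact ih (List.pairwise_cons.mpr
        ⟨fun r hr => by simpa [← hpq] using hq.1 r hr, hq.2⟩) hx
  | case4 p q t hne ih =>
      rw [pvLastScan, if_neg hne] at hx
      rw [List.pairwise_cons] at h
      have hq := List.pairwise_cons.mp h.2
      have hpq : p.2 < q.2 :=
        lt_of_le_of_ne (h.1 q List.mem_cons_self) (by simpa using hne)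
      rcases List.mem_cons.mp hx with hxp | hxr
      · subst hxp
        have hft : t.filter (fun r => r.2 == x.2) = [] := by
          rw [List.filter_eq_nil_iff]
          intro r hr
          have : q.2 ≤ r.2 := hq.1 r hr
          simp only [beq_iff_eq]
          exact fun hc => absurd (hc ▸ lt_of_lt_of_le hpq this) (lt_irrefl _)
        have hfq : (q.2 == x.2) = false := by
          simp only [beq_eq_false_iff_ne, ne_eq]
          exact fun hc => (by simpa using hne : x.2 ≠ q.2) hc.symm
        simp [pvOptMax, hft, hfq]
      · have hmem : x.2 ∈ (q :: t).map Prod.snd :=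
          (mem_map_snd_pvLastScan _ _).mp (List.mem_map_of_mem hxr)
        have hxp2 : (p.2 == x.2) = false := by
          rcases List.mem_map.mp hmem with ⟨s, hs, hseq⟩
          have hqs : q.2 ≤ s.2 := by
            rcases List.mem_cons.mp hs with hsq | hst
            · exact hsq ▸ le_refl _
            · exact hq.1 s hst
          simp only [beq_eq_false_iff_ne, ne_eq]
          rw [← hseq]
          exact fun hc => absurd (hc ▸ lt_of_lt_of_le hpq hqs) (lt_irrefl _)
        have hstep : pvOptMax (p :: q :: t) x.2 = pvOptMax (q :: t) x.2 := by
          simp [pvOptMax, hxp2]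
        rw [hstep]
        exact ih h.2 hxr

theorem mem_lastPerGene (genes : List String) (g : String) :
    g ∈ (pvLastPerGene genes).map Prod.snd ↔ g ∈ genes := by
  unfold pvLastPerGene
  rw [mem_map_snd_pvLastScan]
  rw [((PySem.List.sorted_perm (PySem.List.enumerate genes 0) (fun p => p.2) false).map
        Prod.snd).mem_iff]
  rw [PySem.List.map_snd_enumerate]

theorem pairwise_lastPerGene (genes : List String) :
    (pvLastPerGene genes).Pairwise (fun p q => p.2 < q.2) :=
  pairwise_pvLastScan _ (PySem.List.sorted_pairwise _ _)

theorem val_lastPerGene (genes : List String) (x : Int × String)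
    (hx : x ∈ pvLastPerGene genes) : (pvIdxDict genes).getD x.2 0 = x.1 := by
  have h1 := val_pvLastScan _ (PySem.List.sorted_pairwise
    (PySem.List.enumerate genes 0) (fun p => p.2)) x hx
  have h2 : pvOptMax (PySem.List.enumerate genes 0) x.2 = some x.1 := by
    rw [← pvOptMax_perm _ _ _ (PySem.List.sorted_perm (PySem.List.enumerate genes 0)
      (fun p => p.2) false)]
    exact h1
  exact PySem.Dict.getD_of_get?_eq_some _ _ ((pvIdxDict_get? genes x.2).trans h2)

theorem merge_eq_join (xs ys : List (Int × String))
    (hx : xs.Pairwise (fun p q => p.2 < q.2)) (hy : ys.Pairwise (fun p q => p.2 < q.2)) :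
    pvMergeShared xs ys =
      ((pvJoinF xs ys).map (·.1), (pvJoinF xs ys).map (·.2.1), (pvJoinF xs ys).map (·.2.2)) := by
  induction xs, ys using pvMergeShared.induct with
  | case1 ys => simp [pvMergeShared, pvJoinF]
  | case2 a as => simp [pvMergeShared, pvJoinF]
  | case3 a as b bs heq ih =>
      have hab : a.2 = b.2 := by simpa using heq
      have hJ : pvJoinF (a :: as) (b :: bs) = (a.1, b.1, a.2) :: pvJoinF as bs := by
        unfold pvJoinF
        rw [List.filterMap_cons]
        have hfind : (b :: bs).find? (fun r => r.2 == a.2) = some b :=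
          List.find?_cons_of_pos (by simp [hab])
        rw [hfind]
        simp only [Option.map_some]
        congr 1
        apply List.filterMap_congr
        intro a' ha'
        have : b.2 < a'.2 := hab ▸ (List.pairwise_cons.mp hx).1 a' ha'
        rw [List.find?_cons_of_neg (by simp only [beq_iff_eq]; exact fun hc => absurd (hc ▸ this) (lt_irrefl _))]
      rw [pvMergeShared, if_pos heq, hJ, ih hx.tail hy.tail]
      simp
  | case4 a as b bs hne hlt ih =>
      have hJ : pvJoinF (a :: as) (b :: bs) = pvJoinF as (b :: bs) := by
        unfold pvJoinF
        rw [List.filterMap_cons]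
        have hfind : (b :: bs).find? (fun r => r.2 == a.2) = none := by
          rw [List.find?_eq_none]
          intro r hr
          have hbr : b.2 ≤ r.2 := by
            rcases List.mem_cons.mp hr with h1 | h1
            · exact h1 ▸ le_refl _
            · exact le_of_lt ((List.pairwise_cons.mp hy).1 r h1)
          have := lt_of_lt_of_le hlt hbr
          simp only [beq_iff_eq]
          exact fun hc => absurd (hc ▸ this) (lt_irrefl _)
        rw [hfind]
        rfl
      rw [pvMergeShared, if_neg hne, if_pos hlt, hJ, ih hx.tail hy]
  | case5 a as b bs hne hnlt ih =>
      have hba : b.2 < a.2 := by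
        rcases lt_trichotomy a.2 b.2 with h | h | h
        · exact absurd h hnlt
        · exact absurd (by simp [h]) hne
        · exact h
      have hJ : pvJoinF (a :: as) (b :: bs) = pvJoinF (a :: as) bs := by
        unfold pvJoinF
        apply List.filterMap_congr
        intro a' ha'
        have haa : a.2 ≤ a'.2 := by
          rcases List.mem_cons.mp ha' with h1 | h1
          · exact h1 ▸ le_refl _
          · exact le_of_lt ((List.pairwise_cons.mp hx).1 a' h1)
        have hlt' : b.2 < a'.2 := lt_of_lt_of_le hba haa
        rw [List.find?_cons_of_neg (by
          simp only [beq_iff_eq]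
          exact fun hc => absurd (hc ▸ hlt') (lt_irrefl _))]
      rw [pvMergeShared, if_neg hne, if_neg hnlt, hJ, ih hx hy.tail]

theorem join_names (xs ys : List (Int × String)) :
    (pvJoinF xs ys).map (·.2.2) =
      (xs.filter (fun a => (ys.find? (fun b => b.2 == a.2)).isSome)).map Prod.snd := by
  induction xs with
  | nil => rfl
  | cons a as ih =>
      unfold pvJoinF at ih ⊢
      rw [List.filterMap_cons, List.filter_cons]
      cases hf : ys.find? (fun b => b.2 == a.2) with
      | none => simpa [hf] using ih
      | some b => simpa [hf] using ih

theorem join_vals (sp rf : List String) (x : Int × Int × String)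
    (hx : x ∈ pvJoinF (pvLastPerGene sp) (pvLastPerGene rf)) :
    x.1 = (pvIdxDict sp).getD x.2.2 0 ∧ x.2.1 = (pvIdxDict rf).getD x.2.2 0 := by
  rcases List.mem_filterMap.mp hx with ⟨a, ha, hfa⟩
  rcases Option.map_eq_some_iff.mp hfa with ⟨b, hfind, hxeq⟩
  have hb : b ∈ pvLastPerGene rf := List.mem_of_find?_eq_some hfind
  have hba : b.2 = a.2 := by simpa using List.find?_some hfind
  subst hxeq
  exact ⟨(val_lastPerGene sp a ha).symm,
    by simpa [hba] using (val_lastPerGene rf b hb).symm⟩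

theorem names_mem (sp rf : List String) (g : String) :
    g ∈ (pvJoinF (pvLastPerGene sp) (pvLastPerGene rf)).map (·.2.2) ↔
      g ∈ sp ∧ g ∈ rf := by
  rw [join_names]
  constructor
  · rintro hg
    rcases List.mem_map.mp hg with ⟨a, ha, hag⟩
    have ha' := List.mem_filter.mp ha
    refine ⟨(mem_lastPerGene sp g).mp (hag ▸ List.mem_map_of_mem ha'.1), ?_⟩
    rcases List.find?_isSome.mp ha'.2 with ⟨b, hb, hbp⟩
    have : b.2 = a.2 := by simpa using hbp
    exact (mem_lastPerGene rf g).mp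
      (hag ▸ this ▸ List.mem_map_of_mem hb)
  · rintro ⟨hsp, hrf⟩
    rcases List.mem_map.mp ((mem_lastPerGene sp g).mpr hsp) with ⟨a, ha, hag⟩
    rcases List.mem_map.mp ((mem_lastPerGene rf g).mpr hrf) with ⟨b, hb, hbg⟩
    refine List.mem_map.mpr ⟨a, List.mem_filter.mpr ⟨ha, ?_⟩, hag⟩
    exact List.find?_isSome.mpr ⟨b, hb, by simp [hbg, hag]⟩

theorem names_pairwise (sp rf : List String) :
    ((pvJoinF (pvLastPerGene sp) (pvLastPerGene rf)).map (·.2.2)).Pairwise (· < ·) := by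
  rw [join_names, List.pairwise_map]
  exact (pairwise_lastPerGene sp).filter _

-- ===== VERDICT (by name: the statement is the Claim_ definition above) =====
theorem intersect_genes_py_spec : Claim_equal_intersect_genes_py := by
  intro sp rf _
  unfold Spec_intersect_genes_py intersect_genes_py intersect_genes_py_alt
  rw [merge_eq_join _ _ (pairwise_lastPerGene sp) (pairwise_lastPerGene rf)]
  have hshared : PySem.List.sorted
      (PySem.Set.inter (PySem.Set.ofList sp) (PySem.Set.ofList rf)) (fun g => g) false
      = (pvJoinF (pvLastPerGene sp) (pvLastPerGene rf)).map (·.2.2) := by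
    apply PySem.List.sorted_eq_of_perm_of_pairwise_lt
    · rw [List.perm_ext_iff_of_nodup
        ((names_pairwise sp rf).imp (fun h => ne_of_lt h))
        (PySem.Set.nodup_inter _ _ (PySem.Set.nodup_ofList sp))]
      intro g
      rw [names_mem, PySem.Set.mem_inter, PySem.Set.mem_ofList, PySem.Set.mem_ofList]
    · exact names_pairwise sp rf
  simp only [hshared]
  refine Prod.ext ?_ (Prod.ext ?_ rfl)
  · simp only [List.map_map]
    exact List.map_congr_left fun x hx => ((join_vals sp rf x hx).1).symm
  · simp only [List.map_map]
    exact List.map_congr_left fun x hx => ((join_vals sp rf x hx).2).symm
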